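-- pv_equiv track=rewrite | github.com/arturoornelasb/tibia-bonelord-469-cipher | archive/scripts/analysis/session23_big_block_attack.py | anagram_match
-- ===== SOURCE A (Python) =====
-- from collections import Counter
--
-- def anagram_match(block, word, plus=1):
--     """Check if block is an anagram of word (within +plus extra chars)."""
--     bc = Counter(block)
--     wc = Counter(word)
--     # word letters must all be present in block
--     for ch, cnt in wc.items():
--         if bc.get(ch, 0) < cnt:
--             return False
--     extra = sum(bc.values()) - sum(wc.values())
--     return 0 <= extra <= plus
-- ===== SOURCE B (Python) =====
-- def anagram_match(block, word, plus=1):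
--     """Check if block is an anagram of word (within +plus extra chars)."""
--     b = sorted(block)
--     w = sorted(word)
--     i = j = 0
--     extra = 0
--     while i < len(b) and j < len(w):
--         if b[i] == w[j]:
--             i += 1
--             j += 1
--         elif b[i] < w[j]:
--             extra += 1
--             i += 1
--         else:
--             return False
--     if j < len(w):
--         return False
--     extra += len(b) - i
--     return extra <= plus
-- ===== Notes on version B (the rewrite author's own statement) =====
-- stated objective: alternative
-- what changed: B sorts both character sequences and runs a two-pointer merge scan (counting skipped block characters as extras, failing on the first word character missing from the merge), instead of A's hash-based Counter construction and per-distinct-key comparison.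
import Mathlib
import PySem

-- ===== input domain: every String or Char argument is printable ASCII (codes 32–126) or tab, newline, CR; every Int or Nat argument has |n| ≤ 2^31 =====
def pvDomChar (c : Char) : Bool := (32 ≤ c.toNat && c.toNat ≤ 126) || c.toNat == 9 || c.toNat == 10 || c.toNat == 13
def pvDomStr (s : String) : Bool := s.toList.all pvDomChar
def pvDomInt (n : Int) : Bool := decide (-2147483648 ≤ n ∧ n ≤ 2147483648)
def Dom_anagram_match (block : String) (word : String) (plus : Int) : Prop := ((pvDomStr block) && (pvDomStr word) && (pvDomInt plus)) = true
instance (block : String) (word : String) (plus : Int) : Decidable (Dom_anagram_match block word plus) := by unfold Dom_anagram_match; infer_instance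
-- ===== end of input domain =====

-- B replaces A's Counter/hash comparison by sort + two-pointer merge scan; objective: alternative algorithm, same result.

-- ===== PORT A =====
-- the 'for ch, cnt in wc.items(): if bc.get(ch,0) < cnt: return False' loop, then the extra computation
def anagramALoop (bc wc : PySem.Dict Char Int) (plus : Int) : List (Char × Int) → Bool
  | [] =>
      let extra := bc.values.sum - wc.values.sum
      decide (0 ≤ extra ∧ extra ≤ plus)
  | (ch, cnt) :: rest =>
      if bc.getD ch 0 < cnt then false else anagramALoop bc wc plus rest

def anagram_match (block : String) (word : String) (plus : Int) : Bool :=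
  let bc := PySem.Dict.counter block.toList
  let wc := PySem.Dict.counter word.toList
  anagramALoop bc wc plus wc.items

-- ===== PORT B =====
-- the 'while i < len(b) and j < len(w)' two-pointer merge over the two sorted lists;
-- advancing i (resp. j) past a consumed element = recursing on the tail of b (resp. w)
def anagramBMerge (plus : Int) : List Char → List Char → Int → Bool
  | x :: bs, y :: ws, extra =>
      if x = y then anagramBMerge plus bs ws extra
      else if x < y then anagramBMerge plus bs (y :: ws) (extra + 1)
      else false
  | [], _ :: _, _ => false                                   -- loop ended with j < len(w): return False
  | b, [], extra => decide (extra + (b.length : Int) ≤ plus) -- extra += len(b) - i; return extra <= plus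
  termination_by b w _ => b.length + w.length

def anagram_match_alt (block : String) (word : String) (plus : Int) : Bool :=
  let b := PySem.List.sorted block.toList (fun x => x) false
  let w := PySem.List.sorted word.toList (fun x => x) false
  anagramBMerge plus b w 0

-- ===== PRECONDITION & SPEC =====
def Spec_anagram_match (block : String) (word : String) (plus : Int) (out : Bool) : Prop := out = anagram_match_alt block word plus
instance (block : String) (word : String) (plus : Int) (out : Bool) : Decidable (Spec_anagram_match block word plus out) := by unfold Spec_anagram_match; infer_instance

-- ===== CLAIM (what is proved, stated in full; the proofs are below) =====
def Claim_equal_anagram_match : Prop := ∀ (block : String) (word : String) (plus : Int), Dom_anagram_match block word plus → Spec_anagram_match block word plus (anagram_match block word plus)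

-- ===== LEMMAS AND PROOFS =====

-- the values of Counter(xs) sum to len(xs)
lemma values_sum_counter (xs : List Char) :
    (PySem.Dict.counter xs).values.sum = (xs.length : Int) := by
  have hv : (PySem.Dict.counter xs).values
      = (PySem.Set.ofList xs : List Char).map (fun k => (xs.count k : Int)) := by
    show ((PySem.Dict.counter xs).items.map (·.2)) = _
    rw [PySem.Dict.items_counter]
    simp
  rw [hv]
  have hperm : (PySem.Set.ofList xs : List Char).Perm xs.dedup := by
    refine (List.perm_ext_iff_of_nodup (PySem.Set.nodup_ofList xs) (List.nodup_dedup xs)).mpr ?_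
    intro a
    rw [PySem.Set.mem_ofList, List.mem_dedup]
  rw [(hperm.map (fun k => (xs.count k : Int))).sum_eq]
  calc (xs.dedup.map fun k => (xs.count k : Int)).sum
      = ((xs.dedup.map fun k => xs.count k).sum : Int) := by
        rw [Nat.cast_list_sum, List.map_map]; rfl
    _ = (xs.length : Int) := by rw [List.sum_map_count_dedup_eq_length]

-- A's loop explained: false iff some listed count exceeds the tally
lemma aLoop_spec (bc wc : PySem.Dict Char Int) (plus : Int) (L : List (Char × Int)) :
    anagramALoop bc wc plus L
      = (decide (∀ p ∈ L, p.2 ≤ bc.getD p.1 0)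
         && decide (0 ≤ bc.values.sum - wc.values.sum ∧ bc.values.sum - wc.values.sum ≤ plus)) := by
  induction L with
  | nil => simp [anagramALoop]
  | cons p rest ih =>
    obtain ⟨ch, cnt⟩ := p
    show (if bc.getD ch 0 < cnt then false else anagramALoop bc wc plus rest) = _
    by_cases h : bc.getD ch 0 < cnt
    · rw [if_pos h]
      have hno : ¬ ∀ p ∈ (ch, cnt) :: rest, p.2 ≤ bc.getD p.1 0 := by
        intro hall; exact absurd (hall (ch, cnt) List.mem_cons_self) (by simpa using h)
      have hd : decide (∀ p ∈ (ch, cnt) :: rest, p.2 ≤ bc.getD p.1 0) = false := by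
        simpa using hno
      rw [hd, Bool.false_and]
    · rw [if_neg h, ih]
      have : (∀ p ∈ (ch, cnt) :: rest, p.2 ≤ bc.getD p.1 0) ↔ (∀ p ∈ rest, p.2 ≤ bc.getD p.1 0) := by
        constructor
        · intro hall p hp; exact hall p (List.mem_cons_of_mem _ hp)
        · intro hall p hp
          rcases List.mem_cons.mp hp with rfl | hp'
          · simpa using not_lt.mp h
          · exact hall p hp'
      rw [decide_eq_decide.mpr this]

-- B's merge explained: on sorted inputs it tests multiset containment and the leftover size
lemma bMerge_spec (plus : Int) : ∀ (b w : List Char) (extra : Int),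
    b.Pairwise (· ≤ ·) → w.Pairwise (· ≤ ·) →
    anagramBMerge plus b w extra
      = (decide (∀ c ∈ w, w.count c ≤ b.count c)
         && decide (extra + (b.length : Int) - (w.length : Int) ≤ plus)) := by
  intro b w extra
  induction b, w, extra using anagramBMerge.induct with
  | case1 bs y ws extra ih =>
    intro hb hw
    rw [show anagramBMerge plus (y :: bs) (y :: ws) extra = anagramBMerge plus bs ws extra by
          simp [anagramBMerge],
        ih (List.Pairwise.of_cons hb) (List.Pairwise.of_cons hw)]
    have hcond : (∀ c ∈ ws, ws.count c ≤ bs.count c)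
        ↔ (∀ c ∈ y :: ws, (y :: ws).count c ≤ (y :: bs).count c) := by
      constructor
      · intro hall c hc
        by_cases hcx : c = y
        · subst hcx
          by_cases hcw : c ∈ ws
          · have := hall c hcw; simp [List.count_cons_self]; omega
          · simp [List.count_cons_self, List.count_eq_zero_of_not_mem hcw]
        · have hc' : c ∈ ws := by
            rcases List.mem_cons.mp hc with h' | h'
            · exact absurd h' hcx
            · exact h'
          have := hall c hc'
          rwa [List.count_cons_of_ne (fun h' => hcx h'.symm),
               List.count_cons_of_ne (fun h' => hcx h'.symm)]
      · intro hall c hc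
        have := hall c (List.mem_cons_of_mem _ hc)
        by_cases hcx : c = y
        · subst hcx
          simp [List.count_cons_self] at this; omega
        · rwa [List.count_cons_of_ne (fun h' => hcx h'.symm),
               List.count_cons_of_ne (fun h' => hcx h'.symm)] at this
    have harith : (extra + (bs.length : Int) - (ws.length : Int) ≤ plus)
        ↔ (extra + ((y :: bs).length : Int) - ((y :: ws).length : Int) ≤ plus) := by
      simp only [List.length_cons]
      push_cast
      constructor <;> intro <;> omega
    rw [decide_eq_decide.mpr hcond, decide_eq_decide.mpr harith]
  | case2 x bs y ws extra hne hlt ih =>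
    intro hb hw
    rw [show anagramBMerge plus (x :: bs) (y :: ws) extra
          = anagramBMerge plus bs (y :: ws) (extra + 1) by
          simp [anagramBMerge, hne, hlt],
        ih (List.Pairwise.of_cons hb) hw]
    have hxnot : x ∉ y :: ws := by
      intro hx
      rcases List.mem_cons.mp hx with rfl | hx'
      · exact hne rfl
      · have := (List.pairwise_cons.mp hw).1 x hx'
        exact absurd hlt (not_lt.mpr this)
    have hcond : (∀ c ∈ y :: ws, (y :: ws).count c ≤ bs.count c)
        ↔ (∀ c ∈ y :: ws, (y :: ws).count c ≤ (x :: bs).count c) := by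
      constructor
      · intro hall c hc
        have := hall c hc
        have hcx : c ≠ x := fun h => hxnot (h ▸ hc)
        rwa [List.count_cons_of_ne (fun h' => hcx h'.symm)]
      · intro hall c hc
        have := hall c hc
        have hcx : c ≠ x := fun h => hxnot (h ▸ hc)
        rwa [List.count_cons_of_ne (fun h' => hcx h'.symm)] at this
    have harith : (extra + 1 + (bs.length : Int) - ((y :: ws).length : Int) ≤ plus)
        ↔ (extra + ((x :: bs).length : Int) - ((y :: ws).length : Int) ≤ plus) := by
      simp only [List.length_cons]
      push_cast
      constructor <;> intro <;> omega
    rw [decide_eq_decide.mpr hcond, decide_eq_decide.mpr harith]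
  | case3 x bs y ws extra hne hnlt =>
    intro hb hw
    rw [show anagramBMerge plus (x :: bs) (y :: ws) extra = false by
          simp [anagramBMerge, hne, hnlt]]
    have hylt : y < x := lt_of_le_of_ne (not_lt.mp hnlt) (fun h => hne h.symm)
    have hynot : y ∉ x :: bs := by
      intro hy
      rcases List.mem_cons.mp hy with rfl | hy'
      · exact absurd hylt (lt_irrefl _)
      · have := (List.pairwise_cons.mp hb).1 y hy'
        exact absurd hylt (not_lt.mpr this)
    have hno : ¬ ∀ c ∈ y :: ws, (y :: ws).count c ≤ (x :: bs).count c := by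
      intro hall
      have := hall y List.mem_cons_self
      rw [List.count_cons_self, List.count_eq_zero_of_not_mem hynot] at this
      omega
    have hd : decide (∀ c ∈ y :: ws, (y :: ws).count c ≤ (x :: bs).count c) = false := by
      simpa using hno
    rw [hd, Bool.false_and]
  | case4 y ws extra =>
    intro hb hw
    rw [show anagramBMerge plus [] (y :: ws) extra = false by simp [anagramBMerge]]
    have hno : ¬ ∀ c ∈ y :: ws, (y :: ws).count c ≤ ([] : List Char).count c := by
      intro hall
      have := hall y List.mem_cons_self
      simp [List.count_cons_self] at this
    have hd : decide (∀ c ∈ y :: ws, (y :: ws).count c ≤ ([] : List Char).count c) = false :=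
      decide_eq_false hno
    rw [hd, Bool.false_and]
  | case5 b extra =>
    intro hb hw
    have h1 : anagramBMerge plus b [] extra = decide (extra + (b.length : Int) ≤ plus) := by
      cases b <;> simp [anagramBMerge]
    rw [h1]
    simp

-- multiset containment forces the length inequality
lemma length_le_of_counts (b w : List Char) (h : ∀ c ∈ w, w.count c ≤ b.count c) :
    w.length ≤ b.length := by
  have hms : (↑w : Multiset Char) ≤ (↑b : Multiset Char) := by
    rw [Multiset.le_iff_count]
    intro c
    by_cases hc : c ∈ w
    · simpa using h c hc
    · simp [List.count_eq_zero_of_not_mem hc]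
  simpa using Multiset.card_le_card hms

-- ===== VERDICT (by name: the statement is the Claim_ definition above) =====
theorem anagram_match_spec : Claim_equal_anagram_match := by
  intro block word plus _
  unfold Spec_anagram_match anagram_match anagram_match_alt
  set bl := block.toList
  set wl := word.toList
  set b := PySem.List.sorted bl (fun x => x) false with hbdef
  set w := PySem.List.sorted wl (fun x => x) false with hwdef
  have hbperm : b.Perm bl := PySem.List.sorted_perm bl (fun x => x) false
  have hwperm : w.Perm wl := PySem.List.sorted_perm wl (fun x => x) false
  have hbsor : b.Pairwise (· ≤ ·) := by
    simpa using PySem.List.sorted_pairwise bl (fun x => x)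
  have hwsor : w.Pairwise (· ≤ ·) := by
    simpa using PySem.List.sorted_pairwise wl (fun x => x)
  rw [aLoop_spec, bMerge_spec plus b w 0 hbsor hwsor,
      values_sum_counter bl, values_sum_counter wl]
  -- the two containment conditions coincide
  have hcond : (∀ p ∈ (PySem.Dict.counter wl).items,
        p.2 ≤ (PySem.Dict.counter bl).getD p.1 0)
      ↔ (∀ c ∈ w, w.count c ≤ b.count c) := by
    rw [PySem.Dict.items_counter]
    constructor
    · intro hall c hc
      have hcw : c ∈ wl := hwperm.mem_iff.mp hc
      have h1 := hall (c, (wl.count c : Int))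
        (List.mem_map.mpr ⟨c, (PySem.Set.mem_ofList wl c).mpr hcw, rfl⟩)
      rw [PySem.Dict.getD_counter] at h1
      have h2 : wl.count c ≤ bl.count c := by simpa using h1
      rwa [hbperm.count_eq, hwperm.count_eq]
    · intro hall p hp
      rcases List.mem_map.mp hp with ⟨c, hc, rfl⟩
      have hcw : c ∈ wl := (PySem.Set.mem_ofList wl c).mp hc
      have h1 := hall c (hwperm.mem_iff.mpr hcw)
      rw [hbperm.count_eq, hwperm.count_eq] at h1
      rw [PySem.Dict.getD_counter]
      simpa using h1
  rw [decide_eq_decide.mpr hcond]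
  by_cases hC : ∀ c ∈ w, w.count c ≤ b.count c
  · -- the condition holds, so 0 ≤ len bl - len wl and the arithmetic tests agree
    have hlen : wl.length ≤ bl.length := by
      have := length_le_of_counts b w hC
      rwa [hbperm.length_eq, hwperm.length_eq] at this
    have hblen : (b.length : Int) = (bl.length : Int) := by exact_mod_cast hbperm.length_eq
    have hwlen : (w.length : Int) = (wl.length : Int) := by exact_mod_cast hwperm.length_eq
    have harith : (0 ≤ (bl.length : Int) - (wl.length : Int)
          ∧ (bl.length : Int) - (wl.length : Int) ≤ plus)
        ↔ (0 + (b.length : Int) - (w.length : Int) ≤ plus) := by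
      rw [hblen, hwlen]
      constructor
      · intro h'; omega
      · intro h'
        have h0 : (wl.length : Int) ≤ (bl.length : Int) := by exact_mod_cast hlen
        omega
    rw [decide_eq_decide.mpr harith]
  · have hd : decide (∀ c ∈ w, w.count c ≤ b.count c) = false := by simpa using hC
    rw [hd, Bool.false_and, Bool.false_and]
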